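-- pv_equiv track=rewrite | github.com/lordnader2002-sudo/Shoe-Tracker-v2 | hype.py | lookup_known_price
-- ===== SOURCE A (Python) =====
-- KNOWN_PRICES = [
--     # Jordan
--     ("air jordan 1 retro high og",  180),
--     ("air jordan 1 retro low og",   130),
--     ("air jordan 1 mid",            115),
--     ("air jordan 1 low",            100),
--     ("air jordan 2",                175),
--     ("air jordan 3",                200),
--     ("air jordan 4",                210),
--     ("air jordan 5",                200),
--     ("air jordan 6",                200),
--     ("air jordan 11",               220),
--     ("air jordan 12",               190),
--     ("air jordan 13",               190),
--     ("air jordan 14",               190),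
--     ("jordan 4",                    210),
--     ("jordan 11",                   220),
--     # Nike
--     ("nike dunk low",               110),
--     ("nike dunk high",              120),
--     ("nike sb dunk low",            110),
--     ("nike sb dunk high",           120),
--     ("nike air force 1 low",        100),
--     ("nike air force 1 high",       110),
--     ("air force 1 sp",              130),
--     ("nike air max 1",              110),
--     ("air max 1 sp",                150),
--     ("nike air max 90",             110),
--     ("nike air max 95",             160),
--     ("nike air max 97",             175),
--     ("nike air max 270",            150),
--     ("nike air max plus",           160),
--     ("nike air vapormax",           190),
--     ("nike air presto",             130),
--     ("nike blazer mid",             100),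
--     ("nike cortez",                  85),
--     ("nike pegasus",                130),
--     # Adidas / Yeezy
--     ("yeezy boost 350 v2",          230),
--     ("yeezy boost 700",             300),
--     ("yeezy 700 v3",                270),
--     ("yeezy foam runner",            80),
--     ("yeezy foam rnnr",              80),
--     ("yeezy slide",                  70),
--     ("yeezy 500",                   200),
--     ("adidas samba og",             100),
--     ("adidas samba",                100),
--     ("adidas gazelle",              100),
--     ("adidas ultraboost",           190),
--     ("adidas nmd r1",               140),
--     ("adidas campus",                90),
--     ("adidas handball spezial",     110),
--     ("adidas forum",                 90),
--     # New Balance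
--     ("new balance 990v5",           185),
--     ("new balance 990v4",           185),
--     ("new balance 990v3",           185),
--     ("new balance 992",             185),
--     ("new balance 993",             190),
--     ("new balance 2002r",           130),
--     ("new balance 550",             110),
--     ("new balance 574",              90),
--     ("new balance 327",              80),
--     ("new balance 1080",            165),
--     ("new balance 860",             130),
--     # Puma
--     ("puma suede",                   75),
--     ("puma rs-x",                   110),
--     ("puma clyde",                   80),
--     # Converse
--     ("converse chuck 70",            90),
--     ("converse chuck taylor",        70),
--     ("converse one star",            85),
--     # Saucony
--     ("saucony shadow 6000",         140),
--     ("saucony jazz",                 90),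
--     # ASICS
--     ("asics gel-lyte",              120),
--     ("asics gel-nimbus",            160),
--     # Reebok
--     ("reebok club c",                80),
--     ("reebok classic",               75),
--     ("reebok freestyle",             80),
-- ]
--
-- def lookup_known_price(name: str):
--     """Return a known retail price for the given shoe name, or None.
--     Longest matching substring wins (more specific matches take priority).
--     """
--     n = (name or "").lower()
--     best_len, best_price = 0, None
--     for keyword, price in KNOWN_PRICES:
--         if keyword in n and len(keyword) > best_len:
--             best_len  = len(keyword)
--             best_price = price
--     return best_price
-- ===== SOURCE B (Python) =====
-- # Price data kept as "keyword|price" text rows, parsed once and pre-sorted by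
-- # descending keyword length (stable), so the first substring match is the longest.
-- _ROWS = [
--     "air jordan 1 retro high og|180",
--     "air jordan 1 retro low og|130",
--     "air jordan 1 mid|115",
--     "air jordan 1 low|100",
--     "air jordan 2|175",
--     "air jordan 3|200",
--     "air jordan 4|210",
--     "air jordan 5|200",
--     "air jordan 6|200",
--     "air jordan 11|220",
--     "air jordan 12|190",
--     "air jordan 13|190",
--     "air jordan 14|190",
--     "jordan 4|210",
--     "jordan 11|220",
--     "nike dunk low|110",
--     "nike dunk high|120",
--     "nike sb dunk low|110",
--     "nike sb dunk high|120",
--     "nike air force 1 low|100",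
--     "nike air force 1 high|110",
--     "air force 1 sp|130",
--     "nike air max 1|110",
--     "air max 1 sp|150",
--     "nike air max 90|110",
--     "nike air max 95|160",
--     "nike air max 97|175",
--     "nike air max 270|150",
--     "nike air max plus|160",
--     "nike air vapormax|190",
--     "nike air presto|130",
--     "nike blazer mid|100",
--     "nike cortez|85",
--     "nike pegasus|130",
--     "yeezy boost 350 v2|230",
--     "yeezy boost 700|300",
--     "yeezy 700 v3|270",
--     "yeezy foam runner|80",
--     "yeezy foam rnnr|80",
--     "yeezy slide|70",
--     "yeezy 500|200",
--     "adidas samba og|100",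
--     "adidas samba|100",
--     "adidas gazelle|100",
--     "adidas ultraboost|190",
--     "adidas nmd r1|140",
--     "adidas campus|90",
--     "adidas handball spezial|110",
--     "adidas forum|90",
--     "new balance 990v5|185",
--     "new balance 990v4|185",
--     "new balance 990v3|185",
--     "new balance 992|185",
--     "new balance 993|190",
--     "new balance 2002r|130",
--     "new balance 550|110",
--     "new balance 574|90",
--     "new balance 327|80",
--     "new balance 1080|165",
--     "new balance 860|130",
--     "puma suede|75",
--     "puma rs-x|110",
--     "puma clyde|80",
--     "converse chuck 70|90",
--     "converse chuck taylor|70",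
--     "converse one star|85",
--     "saucony shadow 6000|140",
--     "saucony jazz|90",
--     "asics gel-lyte|120",
--     "asics gel-nimbus|160",
--     "reebok club c|80",
--     "reebok classic|75",
--     "reebok freestyle|80",
-- ]
--
--
-- def _parse():
--     table = []
--     for row in _ROWS:
--         keyword, price = row.split("|")
--         table.append((keyword, int(price)))
--     table.sort(key=lambda kv: len(kv[0]), reverse=True)  # stable: ties keep row order
--     return table
--
--
-- _SORTED_ROWS = _parse()
--
--
-- def lookup_known_price(name: str):
--     """Return a known retail price for the given shoe name, or None.
--     Longest matching substring wins (more specific matches take priority)."""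
--     n = (name or "").lower()
--     for keyword, price in _SORTED_ROWS:
--         if keyword in n:
--             return price
--     return None
-- ===== Notes on version B (the rewrite author's own statement) =====
-- stated objective: alternative
-- what changed: B stores the price data as bar-delimited text rows (keyword, then price) parsed once at import, stable-sorts them by descending keyword length, and returns the first substring match (early exit) instead of A's scan-all-while-tracking-longest loop over a tuple-list literal.
import Mathlib
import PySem

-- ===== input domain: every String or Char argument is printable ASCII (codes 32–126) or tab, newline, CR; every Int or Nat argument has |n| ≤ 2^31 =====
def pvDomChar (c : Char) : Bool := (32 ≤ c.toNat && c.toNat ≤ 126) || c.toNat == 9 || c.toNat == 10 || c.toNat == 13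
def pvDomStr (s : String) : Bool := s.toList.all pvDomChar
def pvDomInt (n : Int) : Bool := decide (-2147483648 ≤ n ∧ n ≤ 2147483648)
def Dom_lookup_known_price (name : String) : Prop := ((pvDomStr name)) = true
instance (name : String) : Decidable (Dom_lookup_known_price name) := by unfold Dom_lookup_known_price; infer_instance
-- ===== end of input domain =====

-- B keeps the price data as bar-delimited text rows parsed once, stable-sorted by
-- descending keyword length, and returns the first substring match (alternative).

-- ===== PORT A =====
def KNOWN_PRICES : List (String × Int) := [
  ("air jordan 1 retro high og", 180),
  ("air jordan 1 retro low og", 130),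
  ("air jordan 1 mid", 115),
  ("air jordan 1 low", 100),
  ("air jordan 2", 175),
  ("air jordan 3", 200),
  ("air jordan 4", 210),
  ("air jordan 5", 200),
  ("air jordan 6", 200),
  ("air jordan 11", 220),
  ("air jordan 12", 190),
  ("air jordan 13", 190),
  ("air jordan 14", 190),
  ("jordan 4", 210),
  ("jordan 11", 220),
  ("nike dunk low", 110),
  ("nike dunk high", 120),
  ("nike sb dunk low", 110),
  ("nike sb dunk high", 120),
  ("nike air force 1 low", 100),
  ("nike air force 1 high", 110),
  ("air force 1 sp", 130),
  ("nike air max 1", 110),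
  ("air max 1 sp", 150),
  ("nike air max 90", 110),
  ("nike air max 95", 160),
  ("nike air max 97", 175),
  ("nike air max 270", 150),
  ("nike air max plus", 160),
  ("nike air vapormax", 190),
  ("nike air presto", 130),
  ("nike blazer mid", 100),
  ("nike cortez", 85),
  ("nike pegasus", 130),
  ("yeezy boost 350 v2", 230),
  ("yeezy boost 700", 300),
  ("yeezy 700 v3", 270),
  ("yeezy foam runner", 80),
  ("yeezy foam rnnr", 80),
  ("yeezy slide", 70),
  ("yeezy 500", 200),
  ("adidas samba og", 100),
  ("adidas samba", 100),
  ("adidas gazelle", 100),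
  ("adidas ultraboost", 190),
  ("adidas nmd r1", 140),
  ("adidas campus", 90),
  ("adidas handball spezial", 110),
  ("adidas forum", 90),
  ("new balance 990v5", 185),
  ("new balance 990v4", 185),
  ("new balance 990v3", 185),
  ("new balance 992", 185),
  ("new balance 993", 190),
  ("new balance 2002r", 130),
  ("new balance 550", 110),
  ("new balance 574", 90),
  ("new balance 327", 80),
  ("new balance 1080", 165),
  ("new balance 860", 130),
  ("puma suede", 75),
  ("puma rs-x", 110),
  ("puma clyde", 80),
  ("converse chuck 70", 90),
  ("converse chuck taylor", 70),
  ("converse one star", 85),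
  ("saucony shadow 6000", 140),
  ("saucony jazz", 90),
  ("asics gel-lyte", 120),
  ("asics gel-nimbus", 160),
  ("reebok club c", 80),
  ("reebok classic", 75),
  ("reebok freestyle", 80)]

def lookup_known_price (name : String) : Option Int :=
  let n := PySem.Str.lower (if name = "" then "" else name)
  (KNOWN_PRICES.foldl
    (fun st kv =>
      if PySem.Str.isIn kv.1 n && decide (st.1 < PySem.Str.len kv.1) then
        (PySem.Str.len kv.1, some kv.2)
      else st)
    ((0 : Int), (none : Option Int))).2

-- ===== PORT B =====
def PRICE_ROWS : List String := [
  "air jordan 1 retro high og|180",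
  "air jordan 1 retro low og|130",
  "air jordan 1 mid|115",
  "air jordan 1 low|100",
  "air jordan 2|175",
  "air jordan 3|200",
  "air jordan 4|210",
  "air jordan 5|200",
  "air jordan 6|200",
  "air jordan 11|220",
  "air jordan 12|190",
  "air jordan 13|190",
  "air jordan 14|190",
  "jordan 4|210",
  "jordan 11|220",
  "nike dunk low|110",
  "nike dunk high|120",
  "nike sb dunk low|110",
  "nike sb dunk high|120",
  "nike air force 1 low|100",
  "nike air force 1 high|110",
  "air force 1 sp|130",
  "nike air max 1|110",
  "air max 1 sp|150",
  "nike air max 90|110",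
  "nike air max 95|160",
  "nike air max 97|175",
  "nike air max 270|150",
  "nike air max plus|160",
  "nike air vapormax|190",
  "nike air presto|130",
  "nike blazer mid|100",
  "nike cortez|85",
  "nike pegasus|130",
  "yeezy boost 350 v2|230",
  "yeezy boost 700|300",
  "yeezy 700 v3|270",
  "yeezy foam runner|80",
  "yeezy foam rnnr|80",
  "yeezy slide|70",
  "yeezy 500|200",
  "adidas samba og|100",
  "adidas samba|100",
  "adidas gazelle|100",
  "adidas ultraboost|190",
  "adidas nmd r1|140",
  "adidas campus|90",
  "adidas handball spezial|110",
  "adidas forum|90",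
  "new balance 990v5|185",
  "new balance 990v4|185",
  "new balance 990v3|185",
  "new balance 992|185",
  "new balance 993|190",
  "new balance 2002r|130",
  "new balance 550|110",
  "new balance 574|90",
  "new balance 327|80",
  "new balance 1080|165",
  "new balance 860|130",
  "puma suede|75",
  "puma rs-x|110",
  "puma clyde|80",
  "converse chuck 70|90",
  "converse chuck taylor|70",
  "converse one star|85",
  "saucony shadow 6000|140",
  "saucony jazz|90",
  "asics gel-lyte|120",
  "asics gel-nimbus|160",
  "reebok club c|80",
  "reebok classic|75",
  "reebok freestyle|80"]

-- _parse(): split each bar-delimited row and stable-sort by descending keyword length.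
-- 'keyword, price = row.split("|")' / 'int(price)' are ported with a "" / 0 default;
-- exact here because every constant row has exactly one '|' and a valid int.
def parsedRows : List (String × Int) :=
  PRICE_ROWS.map (fun row =>
    let parts := (PySem.Str.split? row "|").getD []
    ((PySem.List.pyGet? parts 0).getD "", (PySem.Int.ofStr? ((PySem.List.pyGet? parts 1).getD "")).getD 0))

def SORTED_ROWS : List (String × Int) :=
  PySem.List.sorted parsedRows (fun kv => PySem.Str.len kv.1) (reverse := true)

def lookup_known_price_alt (name : String) : Option Int :=
  let n := PySem.Str.lower (if name = "" then "" else name)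
  (SORTED_ROWS.find? (fun kv => PySem.Str.isIn kv.1 n)).map (fun kv => kv.2)

-- ===== PRECONDITION & SPEC =====
def Spec_lookup_known_price (name : String) (out : Option Int) : Prop := out = lookup_known_price_alt name
instance (name : String) (out : Option Int) : Decidable (Spec_lookup_known_price name out) := by unfold Spec_lookup_known_price; infer_instance

-- ===== CLAIM (what is proved, stated in full; the proofs are below) =====
def Claim_equal_lookup_known_price : Prop := ∀ (name : String), Dom_lookup_known_price name → Spec_lookup_known_price name (lookup_known_price name)

-- ===== LEMMAS AND PROOFS =====

-- The distinct keyword lengths of KNOWN_PRICES, in descending order.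
def pvLenBuckets : List Int := [26, 25, 23, 21, 20, 19, 18, 17, 16, 15, 14, 13, 12, 11, 10, 9, 8]

-- Once the tracked best length dominates every remaining match, A's fold is frozen.
lemma foldl_frozen {α β : Type} (p : α → Bool) (len : α → Int) (f : α → β)
    (L : List α) (st : Int × Option β)
    (h : ∀ x ∈ L, p x = true → len x ≤ st.1) :
    L.foldl (fun acc x => if p x && decide (acc.1 < len x) then (len x, some (f x)) else acc) st
      = st := by
  induction L with
  | nil => rfl
  | cons x L ih =>
    have hc : (p x && decide (st.1 < len x)) = false := by
      by_cases hp : p x = true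
      · simp [hp, not_lt.mpr (h x (by simp) hp)]
      · simp [Bool.eq_false_iff.mpr hp]
    simp only [List.foldl_cons, hc]
    exact ih (fun y hy => h y (by simp [hy]))

-- If d bounds every match length and some match of length exactly d exists,
-- A's fold returns the value of the FIRST match of length d.
lemma foldl_reaches {α β : Type} (p : α → Bool) (len : α → Int) (f : α → β) (d : Int) :
    ∀ (L : List α) (st : Int × Option β),
    (∀ x ∈ L, p x = true → len x ≤ d) → st.1 < d →
    (∃ x ∈ L, p x = true ∧ len x = d) →
    (L.foldl (fun acc x => if p x && decide (acc.1 < len x) then (len x, some (f x)) else acc) st).2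
      = (L.find? (fun x => p x && (len x == d))).map f := by
  intro L
  induction L with
  | nil => intro st _ _ hex; simp at hex
  | cons x L ih =>
    intro st hb hst hex
    by_cases hpx : p x = true
    · by_cases hlx : len x = d
      · have hc : (p x && decide (st.1 < len x)) = true := by simp [hpx, hlx, hst]
        simp only [List.foldl_cons, hc, if_true, List.find?_cons,
          (by simp [hpx, hlx] : (p x && (len x == d)) = true)]
        rw [foldl_frozen p len f L (len x, some (f x))
          (fun y hy hpy => by rw [hlx]; exact hb y (by simp [hy]) hpy)]
        rfl
      · have hlt : len x < d := lt_of_le_of_ne (hb x (by simp) hpx) hlx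
        have hfind : (p x && (len x == d)) = false := by simp [hlx]
        have hex' : ∃ y ∈ L, p y = true ∧ len y = d := by
          obtain ⟨w, hw, hpw, hlw⟩ := hex
          rcases List.mem_cons.mp hw with h | h
          · exact absurd (h ▸ hlw) hlx
          · exact ⟨w, h, hpw, hlw⟩
        simp only [List.foldl_cons, List.find?_cons, hfind]
        by_cases hup : decide (st.1 < len x) = true
        · rw [if_pos (by simp [hpx, hup])]
          exact ih (len x, some (f x)) (fun y hy => hb y (by simp [hy])) hlt hex'
        · rw [if_neg (by simp [hup])]
          exact ih st (fun y hy => hb y (by simp [hy])) hst hex'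
    · have hfind : (p x && (len x == d)) = false := by simp [Bool.eq_false_iff.mpr hpx]
      have hex' : ∃ y ∈ L, p y = true ∧ len y = d := by
        obtain ⟨w, hw, hpw, hlw⟩ := hex
        rcases List.mem_cons.mp hw with h | h
        · exact absurd (h ▸ hpw) hpx
        · exact ⟨w, h, hpw, hlw⟩
      simp only [List.foldl_cons, List.find?_cons, hfind,
        if_neg (by simp [Bool.eq_false_iff.mpr hpx] : ¬ (p x && decide (st.1 < len x)) = true)]
      exact ih st (fun y hy => hb y (by simp [hy])) hst hex'

-- A's longest-match fold over L equals first-match search over L regrouped into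
-- strictly descending length buckets.
lemma foldl_best_eq_find_buckets {α β : Type} (p : α → Bool) (len : α → Int) (f : α → β) :
    ∀ (D : List Int), D.Pairwise (· > ·) → (∀ d ∈ D, 0 < d) →
    ∀ (L : List α), (∀ x ∈ L, p x = true → len x ∈ D) →
    (L.foldl (fun acc x => if p x && decide (acc.1 < len x) then (len x, some (f x)) else acc)
        ((0 : Int), (none : Option β))).2
      = (List.find? p (D.flatMap (fun d => L.filter (fun x => len x == d)))).map f := by
  intro D
  induction D with
  | nil =>
    intro _ _ L hmem
    rw [foldl_frozen p len f L ((0 : Int), none) (fun x hx hp => absurd (hmem x hx hp) (by simp))]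
    simp
  | cons d D ih =>
    intro hD hpos L hmem
    have hDlt : ∀ d' ∈ D, d' < d := fun d' h => List.rel_of_pairwise_cons hD h
    simp only [List.flatMap_cons, List.find?_append]
    by_cases hex : ∃ x ∈ L, p x = true ∧ len x = d
    · have hb : ∀ x ∈ L, p x = true → len x ≤ d := by
        intro x hx hp
        rcases List.mem_cons.mp (hmem x hx hp) with h | h
        · exact le_of_eq h
        · exact le_of_lt (hDlt _ h)
      rw [foldl_reaches p len f d L ((0 : Int), none) hb (hpos d (by simp)) hex]
      have hfilt : List.find? p (L.filter (fun x => len x == d))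
          = L.find? (fun x => p x && (len x == d)) := by
        rw [List.find?_filter]
        congr 1
        funext x
        by_cases h1 : len x = d <;> by_cases h2 : p x = true <;>
          simp [h1, h2, Bool.eq_false_iff.mpr]
      rw [hfilt]
      obtain ⟨w, hw, hpw, hlw⟩ := hex
      have : (L.find? (fun x => p x && (len x == d))).isSome := by
        rw [List.find?_isSome]
        exact ⟨w, hw, by simp [hpw, hlw]⟩
      obtain ⟨y, hy⟩ := Option.isSome_iff_exists.mp this
      simp [hy]
    · have hnone : List.find? p (L.filter (fun x => len x == d)) = none := by
        rw [List.find?_eq_none]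
        intro x hx hpx
        have hxl := List.mem_filter.mp hx
        exact hex ⟨x, hxl.1, hpx, by simpa using hxl.2⟩
      rw [hnone]
      simp only [Option.none_or]
      refine ih (hD.sublist (List.sublist_cons_self d D)) (fun d' h => hpos d' (by simp [h])) L ?_
      intro x hx hp
      rcases List.mem_cons.mp (hmem x hx hp) with h | h
      · exact absurd ⟨x, hx, hp, h⟩ hex
      · exact h

-- B's parsed-and-sorted table is exactly KNOWN_PRICES regrouped into descending length
-- buckets (stability: within a bucket the original order is preserved).
set_option maxHeartbeats 4000000 in
set_option maxRecDepth 16000 in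
lemma sorted_eq_buckets :
    SORTED_ROWS
      = pvLenBuckets.flatMap (fun d => KNOWN_PRICES.filter (fun kv => PySem.Str.len kv.1 == d)) := by
  decide

lemma lens_in_buckets : ∀ kv ∈ KNOWN_PRICES, PySem.Str.len kv.1 ∈ pvLenBuckets := by decide

-- ===== VERDICT (by name: the statement is the Claim_ definition above) =====
theorem lookup_known_price_spec : Claim_equal_lookup_known_price := by
  intro name _
  unfold Spec_lookup_known_price
  simp only [lookup_known_price, lookup_known_price_alt]
  rw [sorted_eq_buckets]
  have H := foldl_best_eq_find_buckets
    (fun kv : String × Int => PySem.Str.isIn kv.1 (PySem.Str.lower (if name = "" then "" else name)))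
    (fun kv : String × Int => PySem.Str.len kv.1) (fun kv : String × Int => kv.2)
    pvLenBuckets (by decide) (by decide)
    KNOWN_PRICES (fun kv h _ => lens_in_buckets kv h)
  simp only [] at H
  exact H
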